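-- pv_equiv track=rewrite | github.com/nathanael-cho/aoc-2025 | day2.py | day2_solution
-- ===== SOURCE A (Python) =====
-- import math
--
-- def num_digits(n: int) -> int:
--     count = 0
--     current = n
--     while current > 0:
--         current = current // 10
--         count += 1
--     return count
--
-- def day2_solution(ranges: list[tuple[int, int]], k: int) -> set[int]:
--     all_invalid_ids = set()
--     for low, high in ranges:
--         if low < 10:
--             low = 10
--
--         low_digit_count = num_digits(low)
--         high_digit_count = num_digits(high)
--
--         # If the low has k * n digits, evaluate to n, and if k * n + l digits for 0 < l < k, evaluate to n + 1
--         smallest_interval_to_repeat = (low_digit_count + 1) // k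
--         # Whether the low has k * n + l digits for 0 <= l < k, evaluate to n
--         largest_interval_to_repeat = high_digit_count // k
--
--         smallest_factor = 0
--         for _ in range(k):
--             smallest_factor = smallest_factor * (10 ** smallest_interval_to_repeat) + 1
--         smallest_building_block = math.ceil(low / smallest_factor)
--         # To account for no leading zeros
--         if smallest_building_block < 10 ** (smallest_interval_to_repeat - 1):
--             smallest_building_block = 10 ** (smallest_interval_to_repeat - 1)
--
--         largest_factor = 0
--         for _ in range(k):
--             largest_factor = largest_factor * (10 ** largest_interval_to_repeat) + 1
--         largest_building_block = math.floor(high / largest_factor)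
--         # To not exceed
--         if largest_building_block >= 10 ** largest_interval_to_repeat:
--             largest_building_block = 10 ** largest_interval_to_repeat - 1
--
--         if smallest_building_block > largest_building_block:
--             continue
--
--         smallest_bb_num_digits = num_digits(smallest_building_block)
--         largest_bb_num_digits = num_digits(largest_building_block)
--         for i in range(smallest_bb_num_digits, largest_bb_num_digits + 1):
--             current_ten = 10 ** i
--             start = max(current_ten // 10, smallest_building_block)
--             end = min(current_ten - 1, largest_building_block)
--             multiplier = 0
--             for _ in range(k):
--                 multiplier = multiplier * (10 ** i) + 1
--             for j in range(start, end + 1):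
--                 all_invalid_ids.add(j * multiplier)
--
--     return all_invalid_ids
-- ===== SOURCE B (Python) =====
-- def day2_solution(ranges: list[tuple[int, int]], k: int) -> set[int]:
--     def rep(m):
--         # multiplier turning an m-digit block into the block repeated k times (closed form)
--         return k if m == 0 else (10 ** (m * k) - 1) // (10 ** m - 1)
--
--     def nd(x):
--         # number of decimal digits of a positive x (grow powers of ten)
--         d, p = 1, 10
--         while p <= x:
--             p *= 10
--             d += 1
--         return d
--
--     out = set()
--     for low, high in ranges:
--         low = max(low, 10)
--         m_lo = (nd(low) + 1) // k
--         m_hi = (nd(high) if high > 0 else 0) // k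
--         sbb = max(-(-low // rep(m_lo)), 10 ** max(m_lo - 1, 0))
--         lbb = min(high // rep(m_hi), 10 ** m_hi - 1)
--         for j in range(sbb, lbb + 1):
--             out.add(j * rep(nd(j)))
--     return out
-- ===== Notes on version B (the rewrite author's own statement) =====
-- stated objective: faster
-- what changed: B replaces A's k-iteration loops that build the repunit factors/multipliers by the closed geometric-sum formula (10^(m*k)-1)//(10^m-1), computes digit counts by growing powers of ten instead of repeated division, and collapses A's nested per-digit-length loops with clamped segment bounds into a single flat loop over the building-block range.
import Mathlib
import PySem

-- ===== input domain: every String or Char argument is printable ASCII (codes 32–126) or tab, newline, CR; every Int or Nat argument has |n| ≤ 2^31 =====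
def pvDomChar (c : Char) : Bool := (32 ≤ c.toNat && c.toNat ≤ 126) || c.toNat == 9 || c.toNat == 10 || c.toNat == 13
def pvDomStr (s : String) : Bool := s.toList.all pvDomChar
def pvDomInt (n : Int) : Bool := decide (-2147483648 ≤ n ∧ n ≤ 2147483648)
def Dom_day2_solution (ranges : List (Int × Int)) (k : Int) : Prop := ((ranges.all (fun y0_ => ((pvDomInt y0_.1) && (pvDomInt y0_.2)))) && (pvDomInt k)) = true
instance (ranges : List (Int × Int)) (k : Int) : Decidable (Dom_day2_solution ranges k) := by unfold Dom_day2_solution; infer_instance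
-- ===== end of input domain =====

-- B replaces A's k-iteration loop-built repunit factors by the closed geometric-sum formula and collapses
-- A's per-digit-length nested loops into one flat loop over the building blocks (objective: faster, measured).

-- ===== PORT A =====

-- A's num_digits: 'while current > 0: current //= 10; count += 1'
def numDigitsGo (current : Int) (count : Int) : Int :=
  if h : 0 < current then
    numDigitsGo (PySem.Int.floordiv current 10) (count + 1)
  else count
termination_by current.toNat
decreasing_by rw [PySem.Int.floordiv_eq_ediv_of_pos (by norm_num)]; omega

def numDigits (n : Int) : Int := numDigitsGo n 0

def day2_solution (ranges : List (Int × Int)) (k : Int) : List Int :=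
  ranges.foldl (fun all_invalid_ids lh =>
    let low := if lh.1 < 10 then 10 else lh.1
    let high := lh.2
    let low_digit_count := numDigits low
    let high_digit_count := numDigits high
    let smallest_interval := PySem.Int.floordiv (low_digit_count + 1) k
    let largest_interval := PySem.Int.floordiv high_digit_count k
    -- 'for _ in range(k): f = f * 10**si + 1'  (Python's 10**e is an int for e ≥ 0; e < 0 only occurs for k ≤ 0, where Python raises below — outside Pre_)
    let smallest_factor := (PySem.List.pyRange 0 k 1).foldl (fun acc _ => acc * 10 ^ smallest_interval.toNat + 1) 0
    -- math.ceil(low / sf): on Dom (|low| ≤ 2^31, 1 ≤ sf < 2^53) the float division is exact enough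
    -- that the result is the integer ceiling; ported as the integer ceiling -((-low) // sf)
    let sbb0 := -(PySem.Int.floordiv (-low) smallest_factor)
    -- 'if sbb < 10**(si-1)': for si = 0 Python compares the integer sbb with the float 0.1;
    -- on Pre_ inputs sbb ≥ 1 there, so that test and the ported test 'sbb0 < 10^0' are both false
    let sbb := if sbb0 < 10 ^ (smallest_interval - 1).toNat then 10 ^ (smallest_interval - 1).toNat else sbb0
    let largest_factor := (PySem.List.pyRange 0 k 1).foldl (fun acc _ => acc * 10 ^ largest_interval.toNat + 1) 0
    -- math.floor(high / lf): exact as floor division on Dom, ported as '//'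
    let lbb0 := PySem.Int.floordiv high largest_factor
    let lbb := if lbb0 ≥ 10 ^ largest_interval.toNat then 10 ^ largest_interval.toNat - 1 else lbb0
    if sbb > lbb then all_invalid_ids
    else
      (PySem.List.pyRange (numDigits sbb) (numDigits lbb + 1) 1).foldl (fun acc i =>
        let current_ten := (10 : Int) ^ i.toNat
        let start := max (PySem.Int.floordiv current_ten 10) sbb
        let stop := min (current_ten - 1) lbb
        let multiplier := (PySem.List.pyRange 0 k 1).foldl (fun m _ => m * 10 ^ i.toNat + 1) 0
        (PySem.List.pyRange start (stop + 1) 1).foldl (fun a j => PySem.Set.add a (j * multiplier)) acc) all_invalid_ids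
  ) PySem.Set.empty

-- ===== PORT B =====

-- Source B's rep(m): the closed-form geometric-sum multiplier (the exponents are ≥ 0 wherever Source B calls rep on a Pre_ input)
def repAlt (k m : Int) : Int :=
  if m = 0 then k
  else PySem.Int.floordiv (10 ^ (m * k).toNat - 1) (10 ^ m.toNat - 1)

-- Source B's nd(x): 'd, p = 1, 10; while p <= x: p *= 10; d += 1'  (0 < p is a loop invariant, carried here for termination)
def ndGo (x : Int) (d : Int) (p : Int) (hp : 0 < p) : Int :=
  if p ≤ x then ndGo x (d + 1) (p * 10) (by positivity)
  else d
termination_by (x + 1 - p).toNat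
decreasing_by omega

def ndAlt (x : Int) : Int := ndGo x 1 10 (by norm_num)

def day2_solution_alt (ranges : List (Int × Int)) (k : Int) : List Int :=
  ranges.foldl (fun out lh =>
    let low := max lh.1 10
    let m_lo := PySem.Int.floordiv (ndAlt low + 1) k
    let m_hi := PySem.Int.floordiv (if 0 < lh.2 then ndAlt lh.2 else 0) k
    let sbb := max (-(PySem.Int.floordiv (-low) (repAlt k m_lo))) (10 ^ (max (m_lo - 1) 0).toNat)
    let lbb := min (PySem.Int.floordiv lh.2 (repAlt k m_hi)) (10 ^ m_hi.toNat - 1)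
    (PySem.List.pyRange sbb (lbb + 1) 1).foldl (fun a j => PySem.Set.add a (j * repAlt k (ndAlt j))) out
  ) PySem.Set.empty

-- ===== PRECONDITION & SPEC =====

-- Pre_ excludes exactly the inputs on which Python A raises: k ≤ 0 with a nonempty ranges list
-- (the factor loop then yields 0 and 'low / 0' raises ZeroDivisionError); A returns on everything else.
def Pre_day2_solution (ranges : List (Int × Int)) (k : Int) : Prop := 1 ≤ k ∨ ranges = []
instance (ranges : List (Int × Int)) (k : Int) : Decidable (Pre_day2_solution ranges k) := by unfold Pre_day2_solution; infer_instance

def pvWitness_day2_solution : (List (Int × Int)) × Int := ([(10, 1250), (95, 120)], 2)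

def Spec_day2_solution (ranges : List (Int × Int)) (k : Int) (out : List Int) : Prop := out = day2_solution_alt ranges k
instance (ranges : List (Int × Int)) (k : Int) (out : List Int) : Decidable (Spec_day2_solution ranges k out) := by unfold Spec_day2_solution; infer_instance

-- ===== CLAIM (what is proved, stated in full; the proofs are below) =====
def Claim_equal_day2_solution : Prop := ∀ (ranges : List (Int × Int)) (k : Int), Dom_day2_solution ranges k → Pre_day2_solution ranges k → Spec_day2_solution ranges k (day2_solution ranges k)

-- ===== LEMMAS AND PROOFS =====

lemma fd10 (n : Int) : PySem.Int.floordiv n 10 = n / 10 :=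
  PySem.Int.floordiv_eq_ediv_of_pos (by norm_num)

lemma go_acc : ∀ (m : Nat) (n c : Int), n.toNat = m → numDigitsGo n c = c + numDigitsGo n 0 := by
  intro m
  induction m using Nat.strong_induction_on with
  | _ m ih =>
    intro n c hm
    rw [numDigitsGo]; conv_rhs => rw [numDigitsGo]
    by_cases h : 0 < n
    · simp only [dif_pos h]
      have hlt : (PySem.Int.floordiv n 10).toNat < m := by rw [fd10]; omega
      rw [ih _ hlt _ (c + 1) rfl, ih _ hlt _ (0 + 1) rfl]
      ring
    · simp only [dif_neg h]; ring

lemma numDigits_rec (n : Int) (h : 0 < n) : numDigits n = 1 + numDigits (n / 10) := by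
  rw [numDigits, numDigitsGo, dif_pos h, fd10, go_acc _ _ _ rfl, numDigits]; ring

lemma numDigits_bounds (n : Int) (hn : 1 ≤ n) :
    1 ≤ numDigits n ∧ 10 ^ ((numDigits n).toNat - 1) ≤ n ∧ n < 10 ^ (numDigits n).toNat := by
  induction hm : n.toNat using Nat.strong_induction_on generalizing n with
  | _ m ih =>
    by_cases h10 : n < 10
    · have : n / 10 = 0 := by omega
      have h1 : numDigits n = 1 := by
        rw [numDigits_rec n (by omega), this]
        simp [numDigits, numDigitsGo]
      rw [h1]; norm_num; omega
    · have hq : 1 ≤ n / 10 := by omega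
      have hlt : (n / 10).toNat < m := by omega
      obtain ⟨d1, d2, d3⟩ := ih _ hlt (n / 10) hq rfl
      have hrec := numDigits_rec n (by omega)
      set d := numDigits (n / 10) with hd
      have hdt : (numDigits n).toNat = d.toNat + 1 := by omega
      refine ⟨by omega, ?_, ?_⟩
      · rw [hdt]
        have : (10:Int) ^ (d.toNat + 1 - 1) = 10 * 10 ^ (d.toNat - 1) := by
          rw [show d.toNat + 1 - 1 = (d.toNat - 1) + 1 by omega]; ring
        rw [this]; omega
      · rw [hdt, pow_succ]
        have : n < 10 * (n / 10) + 10 := by omega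
        nlinarith [d3]

lemma digits_unique (n d : Int) (hd : 1 ≤ d) (h1 : 10 ^ (d.toNat - 1) ≤ n) (h2 : n < 10 ^ d.toNat)
    (hn : 1 ≤ n) : d = numDigits n := by
  obtain ⟨e1, e2, e3⟩ := numDigits_bounds n hn
  by_contra hne
  rcases lt_or_gt_of_ne hne with h | h
  · have : (10:Int) ^ d.toNat ≤ 10 ^ ((numDigits n).toNat - 1) :=
      pow_le_pow_right₀ (by norm_num) (by omega)
    omega
  · have : (10:Int) ^ (numDigits n).toNat ≤ 10 ^ (d.toNat - 1) :=
      pow_le_pow_right₀ (by norm_num) (by omega)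
    omega

lemma ndGo_spec (x : Int) : ∀ (d p : Int) (hp : 0 < p), p = 10 ^ d.toNat → 1 ≤ d →
    10 ^ (d.toNat - 1) ≤ x → ndGo x d p hp = numDigits x := by
  intro d p hp
  induction d, p, hp using ndGo.induct with
  | x => exact x
  | case1 d p hp hle ih =>
    intro hpow hd hlow
    rw [ndGo]; simp only [if_pos hle]
    apply ih
    · rw [hpow, show (d+1).toNat = d.toNat + 1 by omega]; ring
    · omega
    · rw [show (d+1).toNat - 1 = d.toNat by omega, ← hpow]; exact hle
  | case2 d p hp hle =>
    intro hpow hd hlow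
    rw [ndGo]; simp only [if_neg hle]
    have h1x : (1:Int) ≤ 10 ^ (d.toNat - 1) := one_le_pow₀ (by norm_num)
    rw [hpow] at hle
    exact digits_unique x d hd hlow (by omega) (by omega)

lemma repAlt_geom (k m : Int) (hk : 1 ≤ k) (hm : 0 ≤ m) :
    repAlt k m = ∑ j ∈ Finset.range k.toNat, ((10:Int) ^ m.toNat) ^ j := by
  rw [repAlt]
  by_cases h0 : m = 0
  · simp [h0]; omega
  · rw [if_neg h0]
    have hm1 : 1 ≤ m := by omega
    have hB : (10:Int) ^ m.toNat ≥ 10 := by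
      calc (10:Int) ^ m.toNat ≥ 10 ^ 1 := pow_le_pow_right₀ (by norm_num) (by omega)
      _ = 10 := by norm_num
    have hmul : (∑ j ∈ Finset.range k.toNat, ((10:Int) ^ m.toNat) ^ j) * ((10:Int) ^ m.toNat - 1)
        = (10 ^ m.toNat) ^ k.toNat - 1 := geom_sum_mul _ _
    have hpow : (10:Int) ^ (m * k).toNat = (10 ^ m.toNat) ^ k.toNat := by
      rw [← pow_mul]
      congr 1
      rw [Int.toNat_mul] <;> omega
    rw [PySem.Int.floordiv_eq_ediv_of_pos (by have := hB; omega), hpow, ← hmul,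
      Int.mul_ediv_cancel _ (by have := hB; omega)]

lemma repAlt_pos (k m : Int) (hk : 1 ≤ k) (hm : 0 ≤ m) : 1 ≤ repAlt k m := by
  rw [repAlt_geom k m hk hm]
  have h1 : ∀ j ∈ Finset.range k.toNat, (0:Int) ≤ ((10:Int) ^ m.toNat) ^ j := by
    intro j _; positivity
  have hsub : Finset.range 1 ⊆ Finset.range k.toNat := (by intro x hx; simp [Finset.mem_range] at *; omega)
  calc (1:Int) = ∑ j ∈ Finset.range 1, ((10:Int) ^ m.toNat) ^ j := by simp
  _ ≤ _ := Finset.sum_le_sum_of_subset_of_nonneg hsub (by intro j hj _; positivity)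

lemma foldl_factor (B : Int) : ∀ (l : List Int) (a : Int),
    l.foldl (fun acc _ => acc * B + 1) a = a * B ^ l.length + ∑ j ∈ Finset.range l.length, B ^ j := by
  intro l
  induction l with
  | nil => simp
  | cons x t ih =>
    intro a
    simp only [List.foldl_cons, List.length_cons, ih]
    have h1 : ∑ j ∈ Finset.range (t.length+1), B ^ j
        = ∑ j ∈ Finset.range t.length, B ^ j + B ^ t.length := Finset.sum_range_succ _ _
    have h2 : ∑ j ∈ Finset.range (t.length+1), B ^ j
        = 1 + ∑ j ∈ Finset.range t.length, B * B ^ j := by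
      rw [Finset.sum_range_succ']
      simp [pow_succ, mul_comm, add_comm]
    ring_nf
    ring_nf at h1 h2 ih ⊢
    linarith [h1, h2]

lemma factor_eq (k m : Int) (hk : 1 ≤ k) (hm : 0 ≤ m) :
    (PySem.List.pyRange 0 k 1).foldl (fun acc _ => acc * 10 ^ m.toNat + 1) 0 = repAlt k m := by
  rw [foldl_factor, PySem.List.length_pyRange_one, repAlt_geom k m hk hm]
  simp

lemma numDigits_mono (a b : Int) (ha : 1 ≤ a) (hab : a ≤ b) : numDigits a ≤ numDigits b := by
  obtain ⟨a1, a2, a3⟩ := numDigits_bounds a ha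
  obtain ⟨b1, b2, b3⟩ := numDigits_bounds b (by omega)
  by_contra h
  have : (10:Int) ^ (numDigits b).toNat ≤ 10 ^ ((numDigits a).toNat - 1) :=
    pow_le_pow_right₀ (by norm_num) (by omega)
  omega

lemma pow_ten_div (t : Nat) (ht : 1 ≤ t) : PySem.Int.floordiv ((10:Int) ^ t) 10 = 10 ^ (t - 1) := by
  have h : (10:Int) ^ t = 10 ^ (t - 1) * 10 := by rw [← pow_succ]; congr 1; omega
  rw [PySem.Int.floordiv_eq_ediv_of_pos (by norm_num), h, Int.mul_ediv_cancel _ (by norm_num)]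

lemma segs_eq (M : Int → Int) : ∀ (n : Nat) (sbb lbb : Int), 1 ≤ sbb → sbb ≤ lbb →
    ((numDigits lbb).toNat - (numDigits sbb).toNat = n) →
    (PySem.List.pyRange (numDigits sbb) (numDigits lbb + 1) 1).flatMap (fun i =>
      (PySem.List.pyRange (max (PySem.Int.floordiv ((10:Int) ^ i.toNat) 10) sbb)
        (min ((10:Int) ^ i.toNat - 1) lbb + 1) 1).map (fun j => j * M i))
    = (PySem.List.pyRange sbb (lbb + 1) 1).map (fun j => j * M (numDigits j)) := by
  intro n
  induction n with
  | zero =>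
    intro sbb lbb h1 h2 hn
    obtain ⟨s1, s2, s3⟩ := numDigits_bounds sbb h1
    obtain ⟨l1, l2, l3⟩ := numDigits_bounds lbb (by omega)
    have hmono := numDigits_mono sbb lbb h1 h2
    have heq : numDigits sbb = numDigits lbb := by omega
    have e1 : (10:Int) ^ (numDigits sbb).toNat = 10 ^ (numDigits lbb).toNat := by rw [heq]
    have e2 : (10:Int) ^ ((numDigits sbb).toNat - 1) = 10 ^ ((numDigits lbb).toNat - 1) := by rw [heq]
    rw [← heq, PySem.List.pyRange_one_singleton]
    simp only [List.flatMap_cons, List.flatMap_nil, List.append_nil]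
    rw [pow_ten_div _ (by omega)]
    rw [max_eq_right (by omega), min_eq_right (by omega)]
    apply List.map_congr_left
    intro j hj
    rw [PySem.List.mem_pyRange_one] at hj
    exact congrArg (j * M ·) (digits_unique j (numDigits sbb) (by omega)
      (le_trans s2 (by omega)) (by omega) (by omega))
  | succ n ih =>
    intro sbb lbb h1 h2 hn
    obtain ⟨s1, s2, s3⟩ := numDigits_bounds sbb h1
    obtain ⟨l1, l2, l3⟩ := numDigits_bounds lbb (by omega)
    have hmono := numDigits_mono sbb lbb h1 h2
    have hlt : numDigits sbb < numDigits lbb := by omega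
    set c : Int := 10 ^ (numDigits sbb).toNat with hc
    have hc1 : 1 ≤ c := one_le_pow₀ (by norm_num)
    have hcl : c ≤ lbb := by
      have : (10:Int) ^ (numDigits sbb).toNat ≤ 10 ^ ((numDigits lbb).toNat - 1) :=
        pow_le_pow_right₀ (by norm_num) (by omega)
      omega
    have hdc : numDigits c = numDigits sbb + 1 := by
      have := digits_unique c (numDigits sbb + 1) (by omega)
        (by rw [show (numDigits sbb + 1).toNat - 1 = (numDigits sbb).toNat by omega]) ?hb (by omega)
      · omega
      case hb =>
        rw [show (numDigits sbb + 1).toNat = (numDigits sbb).toNat + 1 by omega, pow_succ]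
        omega
    -- split the outer digit-length list
    rw [PySem.List.pyRange_one_cons (by omega)]
    simp only [List.flatMap_cons]
    -- split the block range at c
    rw [PySem.List.pyRange_one_append sbb c (lbb + 1) (by omega) (by omega), List.map_append]
    congr 1
    · -- first digit group
      rw [pow_ten_div _ (by omega)]
      rw [max_eq_right (by omega), min_eq_left (by omega)]
      rw [show (c - 1) + 1 = c by ring]
      apply List.map_congr_left
      intro j hj
      rw [PySem.List.mem_pyRange_one] at hj
      exact congrArg (j * M ·) (digits_unique j (numDigits sbb) (by omega) (by omega) (by omega) (by omega))
    · -- remaining digit groups: the IH instantiated at c, after aligning the max with sbb vs c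
      have hm : ∀ i ∈ PySem.List.pyRange (numDigits sbb + 1) (numDigits lbb + 1) 1,
          (PySem.List.pyRange (max (PySem.Int.floordiv ((10:Int) ^ i.toNat) 10) sbb)
            (min ((10:Int) ^ i.toNat - 1) lbb + 1) 1).map (fun j => j * M i)
          = (PySem.List.pyRange (max (PySem.Int.floordiv ((10:Int) ^ i.toNat) 10) c)
            (min ((10:Int) ^ i.toNat - 1) lbb + 1) 1).map (fun j => j * M i) := by
        intro i hi
        rw [PySem.List.mem_pyRange_one] at hi
        have hp : c ≤ (10:Int) ^ (i.toNat - 1) :=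
          pow_le_pow_right₀ (by norm_num) (by omega)
        rw [pow_ten_div _ (by omega)]
        rw [max_eq_left (by omega), max_eq_left (by omega)]
      calc (PySem.List.pyRange (numDigits sbb + 1) (numDigits lbb + 1) 1).flatMap (fun i =>
            (PySem.List.pyRange (max (PySem.Int.floordiv ((10:Int) ^ i.toNat) 10) sbb)
              (min ((10:Int) ^ i.toNat - 1) lbb + 1) 1).map (fun j => j * M i))
          = (PySem.List.pyRange (numDigits sbb + 1) (numDigits lbb + 1) 1).flatMap (fun i =>
            (PySem.List.pyRange (max (PySem.Int.floordiv ((10:Int) ^ i.toNat) 10) c)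
              (min ((10:Int) ^ i.toNat - 1) lbb + 1) 1).map (fun j => j * M i)) := by
            rw [List.flatMap_def, List.flatMap_def, List.map_congr_left hm]
      _ = (PySem.List.pyRange c (lbb + 1) 1).map (fun j => j * M (numDigits j)) := by
            have := ih c lbb hc1 hcl (by omega)
            rw [hdc] at this
            exact this

lemma numDigits_nonpos (n : Int) (h : n ≤ 0) : numDigits n = 0 := by
  rw [numDigits, numDigitsGo, dif_neg (by omega : ¬ (0:Int) < n)]

lemma numDigits_nonneg (n : Int) : 0 ≤ numDigits n := by
  by_cases h : 1 ≤ n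
  · have := (numDigits_bounds n h).1; omega
  · rw [numDigits_nonpos n (by omega)]

lemma ndAlt_eq (x : Int) (hx : 1 ≤ x) : ndAlt x = numDigits x := by
  refine ndGo_spec x 1 10 (by norm_num) (by norm_num) (by norm_num) (by simpa using hx)

lemma nested_eq (k : Int) (hk : 1 ≤ k) (sbb lbb : Int) (h1 : 1 ≤ sbb) (acc : List Int) :
    (if sbb > lbb then acc
     else (PySem.List.pyRange (numDigits sbb) (numDigits lbb + 1) 1).foldl (fun acc2 i =>
        (PySem.List.pyRange (max (PySem.Int.floordiv ((10:Int) ^ i.toNat) 10) sbb)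
          (min ((10:Int) ^ i.toNat - 1) lbb + 1) 1).foldl
          (fun a j => PySem.Set.add a (j * ((PySem.List.pyRange 0 k 1).foldl (fun m _ => m * 10 ^ i.toNat + 1) 0))) acc2) acc)
  = (PySem.List.pyRange sbb (lbb + 1) 1).foldl (fun a j => PySem.Set.add a (j * repAlt k (ndAlt j))) acc := by
  by_cases hcmp : sbb > lbb
  · rw [if_pos hcmp, PySem.List.pyRange_one_eq_nil (by omega)]
    rfl
  · rw [if_neg hcmp]
    have hle : sbb ≤ lbb := by omega
    have hs1 := (numDigits_bounds sbb h1).1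
    -- replace the multiplier loop by the closed form, on each digit length i
    have hcongr : ∀ (acc2 : List Int) (i : Int),
        i ∈ PySem.List.pyRange (numDigits sbb) (numDigits lbb + 1) 1 →
        ((PySem.List.pyRange (max (PySem.Int.floordiv ((10:Int) ^ i.toNat) 10) sbb)
          (min ((10:Int) ^ i.toNat - 1) lbb + 1) 1).foldl
          (fun a j => PySem.Set.add a (j * ((PySem.List.pyRange 0 k 1).foldl (fun m _ => m * 10 ^ i.toNat + 1) 0))) acc2)
        = ((PySem.List.pyRange (max (PySem.Int.floordiv ((10:Int) ^ i.toNat) 10) sbb)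
          (min ((10:Int) ^ i.toNat - 1) lbb + 1) 1).map (fun j => j * repAlt k i)).foldl PySem.Set.add acc2 := by
      intro acc2 i hi
      rw [PySem.List.mem_pyRange_one] at hi
      rw [factor_eq k i hk (by omega), List.foldl_map]
    refine (PySem.List.foldl_congr_mem _ _ _ acc hcongr).trans ?_
    rw [← List.foldl_flatMap,
      segs_eq (repAlt k) ((numDigits lbb).toNat - (numDigits sbb).toNat) sbb lbb h1 hle rfl,
      List.foldl_map]
    refine PySem.List.foldl_congr_mem _ _ _ acc ?_
    intro a j hj
    rw [PySem.List.mem_pyRange_one] at hj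
    rw [ndAlt_eq j (by omega)]


-- ===== VERDICT (by name: the statement is the Claim_ definition above) =====
theorem day2_solution_spec : Claim_equal_day2_solution := by
  intro ranges k _ hpre
  unfold Pre_day2_solution at hpre
  show day2_solution ranges k = day2_solution_alt ranges k
  rcases hpre with hk | hnil
  case inr => subst hnil; rfl
  rw [day2_solution, day2_solution_alt]
  refine PySem.List.foldl_congr_mem _ _ _ PySem.Set.empty ?_
  intro acc lh _
  dsimp only
  have hk0 : (0:Int) < k := by omega
  -- low clamp
  have h1 : (if lh.1 < 10 then (10:Int) else lh.1) = max lh.1 10 := by split <;> omega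
  rw [h1]
  have hL : (10:Int) ≤ max lh.1 10 := le_max_right _ _
  -- digit counts
  have hndL := numDigits_bounds (max lh.1 10) (by omega)
  have hnda : ndAlt (max lh.1 10) = numDigits (max lh.1 10) := ndAlt_eq _ (by omega)
  rw [hnda]
  have hhigh : (if 0 < lh.2 then ndAlt lh.2 else 0) = numDigits lh.2 := by
    split
    · exact ndAlt_eq _ (by omega)
    · exact (numDigits_nonpos _ (by omega)).symm
  rw [hhigh]
  have hndH : 0 ≤ numDigits lh.2 := numDigits_nonneg _
  -- intervals
  have hsi : 0 ≤ PySem.Int.floordiv (numDigits (max lh.1 10) + 1) k := by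
    rw [PySem.Int.floordiv_eq_ediv_of_pos hk0]
    exact Int.ediv_nonneg (by omega) (by omega)
  have hli : 0 ≤ PySem.Int.floordiv (numDigits lh.2) k := by
    rw [PySem.Int.floordiv_eq_ediv_of_pos hk0]
    exact Int.ediv_nonneg (by omega) (by omega)
  -- factors
  rw [factor_eq k _ hk hsi, factor_eq k _ hk hli]
  set si := PySem.Int.floordiv (numDigits (max lh.1 10) + 1) k with hsidef
  set li := PySem.Int.floordiv (numDigits lh.2) k with hlidef
  have hrs : 1 ≤ repAlt k si := repAlt_pos k si hk hsi
  have hrl : 1 ≤ repAlt k li := repAlt_pos k li hk hli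
  have hsbb0 : 1 ≤ -(PySem.Int.floordiv (-(max lh.1 10)) (repAlt k si)) := by
    rw [PySem.Int.floordiv_eq_ediv_of_pos (by omega)]
    have := Int.ediv_neg_of_neg_of_pos (a := -(max lh.1 10)) (b := repAlt k si) (by omega) (by omega)
    omega
  have htn : ((si - 1).toNat) = ((max (si - 1) 0).toNat) := by omega
  have hsbb : (if -(PySem.Int.floordiv (-(max lh.1 10)) (repAlt k si)) < 10 ^ (si - 1).toNat
      then (10:Int) ^ (si - 1).toNat
      else -(PySem.Int.floordiv (-(max lh.1 10)) (repAlt k si)))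
      = max (-(PySem.Int.floordiv (-(max lh.1 10)) (repAlt k si))) (10 ^ (max (si - 1) 0).toNat) := by
    rw [← htn]; split <;> omega
  rw [hsbb]
  have hlbb : (if PySem.Int.floordiv lh.2 (repAlt k li) ≥ 10 ^ li.toNat
      then (10:Int) ^ li.toNat - 1
      else PySem.Int.floordiv lh.2 (repAlt k li))
      = min (PySem.Int.floordiv lh.2 (repAlt k li)) (10 ^ li.toNat - 1) := by
    split <;> omega
  rw [hlbb]
  exact nested_eq k hk _ _ (le_trans hsbb0 (le_max_left _ _)) acc
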